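-- pv_equiv track=rewrite | github.com/Max-Moro/lg-cli | lg/paths/labels.py | _common_dir_prefix
-- ===== SOURCE A (Python) =====
-- from typing import Dict, Iterable, List, Literal, Tuple
--
-- def _common_dir_prefix(paths: List[List[str]]) -> List[str]:
--     """
--     Общий префикс директорий по всем путям (без имени файла).
--     Возвращает список компонент директории, которые совпадают у всех.
--     """
--     if not paths:
--         return []
--     # Сравниваем только директории (все кроме последней компоненты — basename)
--     dirs = [p[:-1] if p else [] for p in paths]
--     if not all(dirs):
--         # Если у кого-то путь плоский (только basename), префикса нет
--         pass
--     pref: List[str] = []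
--     i = 0
--     while True:
--         token: str | None = None
--         for d in dirs:
--             if i >= len(d):
--                 token = None
--                 break
--             if token is None:
--                 token = d[i]
--             elif d[i] != token:
--                 token = None
--                 break
--         if token is None:
--             break
--         pref.append(token)
--         i += 1
--     return pref
-- ===== SOURCE B (Python) =====
-- def _lcp(a, b):
--     out = []
--     for x, y in zip(a, b):
--         if x != y:
--             break
--         out.append(x)
--     return out
--
--
-- def _common_dir_prefix(paths):
--     if not paths:
--         return []
--     dirs = [p[:-1] if p else [] for p in paths]
--     prefix = dirs[0]
--     for d in dirs[1:]:
--         prefix = _lcp(prefix, d)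
--     return prefix
-- ===== Notes on version B (the rewrite author's own statement) =====
-- stated objective: simpler
-- what changed: Replaces the column-by-column while/for scan with an inner token variable by a running-prefix fold: the common prefix of the first dir list is pairwise intersected with each subsequent one.
import Mathlib
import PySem

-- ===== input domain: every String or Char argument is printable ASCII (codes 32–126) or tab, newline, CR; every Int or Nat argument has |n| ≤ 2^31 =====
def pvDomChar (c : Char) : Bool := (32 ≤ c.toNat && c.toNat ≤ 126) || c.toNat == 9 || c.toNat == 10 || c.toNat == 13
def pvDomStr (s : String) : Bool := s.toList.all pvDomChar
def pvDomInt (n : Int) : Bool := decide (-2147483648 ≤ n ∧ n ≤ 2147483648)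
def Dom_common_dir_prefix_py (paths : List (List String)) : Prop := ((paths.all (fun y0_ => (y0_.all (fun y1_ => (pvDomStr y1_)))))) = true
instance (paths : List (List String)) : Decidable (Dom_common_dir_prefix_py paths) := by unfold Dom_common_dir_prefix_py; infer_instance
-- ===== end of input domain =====

-- B replaces A's column-by-column scan (while over index i with an inner token loop)
-- by a running-prefix fold: pairwise common prefix with each subsequent dir list.
-- Same result on every input; objective: simpler decomposition (no speed claim).

-- ===== PORT A =====
-- inner `for d in dirs` loop of the while body: `tok` is the running token (None at entry)
def tokA : List (List String) → Nat → Option String → Option String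
  | [], _, tok => tok
  | d :: rest, i, tok =>
    if h : i < d.length then
      match tok with
      | none => tokA rest i (some d[i])
      | some s => if d[i] = s then tokA rest i (some s) else none
    else none

-- used only for the termination argument of the `while True` loop below
theorem tokA_some_lt (dirs : List (List String)) (i : Nat) (t : Option String)
    (s : String) (h : tokA dirs i t = some s) :
    ∀ d ∈ dirs, i < d.length := by
  fun_induction tokA dirs i t with
  | case1 i tok => simp
  | case2 d rest i hlt ih =>
    intro e he
    rcases List.mem_cons.mp he with rfl | he'
    · exact hlt
    · exact ih h e he'
  | case3 d rest i hlt ih =>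
    intro e he
    rcases List.mem_cons.mp he with rfl | he'
    · exact hlt
    · exact ih h e he'
  | case4 d rest i hlt s' hne => cases h
  | case5 d rest i tok hnlt => cases h

-- `while True:` loop of A: compute the i-th column token, append while it is defined
def loopA (dirs : List (List String)) (i : Nat) (pref : List String) : List String :=
  match h : tokA dirs i none with
  | none => pref
  | some s => loopA dirs (i + 1) (pref ++ [s])
termination_by (dirs.map List.length).sum + 1 - i
decreasing_by
  have hall : ∀ d ∈ dirs, i < d.length := tokA_some_lt dirs i none s h
  rcases dirs with _ | ⟨d, rest⟩
  · simp [tokA] at h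
  · have hd := hall d (by simp)
    have : d.length ≤ (List.map List.length (d :: rest)).sum := by
      simp [List.sum_cons]
    omega

-- p[:-1] if p else []  ≡  dropLast (dropLast [] = [])
def common_dir_prefix_py (paths : List (List String)) : List String :=
  if paths = [] then []
  else loopA (paths.map (fun p => p.dropLast)) 0 []

-- ===== PORT B =====
-- `_lcp`: zip-with-break loop ≡ simultaneous structural recursion
def lcp2 : List String → List String → List String
  | x :: xs, y :: ys => if x = y then x :: lcp2 xs ys else []
  | _, _ => []

def common_dir_prefix_py_alt (paths : List (List String)) : List String :=
  match paths.map (fun p => p.dropLast) with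
  | [] => []
  | d0 :: rest => rest.foldl lcp2 d0

-- ===== PRECONDITION & SPEC =====
def Spec_common_dir_prefix_py (paths : List (List String)) (out : List String) : Prop := out = common_dir_prefix_py_alt paths
instance (paths : List (List String)) (out : List String) : Decidable (Spec_common_dir_prefix_py paths out) := by unfold Spec_common_dir_prefix_py; infer_instance

-- ===== CLAIM (what is proved, stated in full; the proofs are below) =====
def Claim_equal_common_dir_prefix_py : Prop := ∀ (paths : List (List String)), Dom_common_dir_prefix_py paths → Spec_common_dir_prefix_py paths (common_dir_prefix_py paths)

-- ===== LEMMAS AND PROOFS =====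

-- multi-way longest common prefix, the common reference point of both proofs
def tailsAll : List (List String) → List (List String)
  | [] => []
  | d :: rest => d.tail :: tailsAll rest

theorem sum_tailsAll_le (rest : List (List String)) :
    ((tailsAll rest).map List.length).sum ≤ (rest.map List.length).sum := by
  induction rest with
  | nil => simp [tailsAll]
  | cons d rs ih =>
    simp only [tailsAll, List.map_cons, List.sum_cons]
    have := d.length_tail
    omega

theorem tailsAll_eq_map (l : List (List String)) : tailsAll l = l.map List.tail := by
  induction l with
  | nil => rfl
  | cons d rs ih => simp [tailsAll, ih]

def lcpAll : List (List String) → List String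
  | [] => []
  | [] :: _ => []
  | (x :: xs) :: rest =>
    if ((x :: xs) :: rest).all (fun r => r.head? == some x) then
      x :: lcpAll (xs :: tailsAll rest)
    else []
termination_by ds => (ds.map List.length).sum
decreasing_by
  have := sum_tailsAll_le rest
  simp only [List.map_cons, List.sum_cons, List.length_cons]
  omega

-- soundness of the inner loop: a returned token is at column i of every dir
theorem tokA_sound (dirs : List (List String)) (i : Nat) (t : Option String)
    (s : String) (h : tokA dirs i t = some s) :
    (∀ d ∈ dirs, ∃ hl : i < d.length, d[i] = s) ∧ (∀ x, t = some x → x = s) ∧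
      (t = none → dirs ≠ []) := by
  fun_induction tokA dirs i t with
  | case1 i tok =>
    refine ⟨by simp, ?_, ?_⟩
    · intro x hx; rw [hx] at h; injection h
    · intro hn; rw [hn] at h; cases h
  | case2 d rest i hlt ih =>
    obtain ⟨hrest, hinj, -⟩ := ih h
    refine ⟨?_, ?_, fun _ => by simp⟩
    · intro e he
      rcases List.mem_cons.mp he with rfl | he'
      · exact ⟨hlt, hinj _ rfl⟩
      · exact hrest e he'
    · intro x hx; cases hx
  | case3 d rest i hlt ih =>
    obtain ⟨hrest, hinj, -⟩ := ih h
    refine ⟨?_, ?_, fun _ => by simp⟩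
    · intro e he
      rcases List.mem_cons.mp he with rfl | he'
      · exact ⟨hlt, hinj _ rfl⟩
      · exact hrest e he'
    · intro x hx
      injection hx with hx
      rw [← hx]
      exact hinj _ rfl
  | case4 d rest i hlt s' hne => cases h
  | case5 d rest i tok hnlt => cases h

theorem tokA_complete (dirs : List (List String)) (i : Nat) (s : String)
    (h : ∀ d ∈ dirs, ∃ hl : i < d.length, d[i] = s) :
    tokA dirs i (some s) = some s := by
  induction dirs with
  | nil => rfl
  | cons d rest ih =>
    obtain ⟨hl, he⟩ := h d (by simp)
    simp only [tokA, dif_pos hl, he, if_pos]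
    exact ih (fun e he' => h e (by simp [he']))

-- characterisation of the token at column i
theorem tokA_some (dirs : List (List String)) (i : Nat) (s : String) :
    tokA dirs i none = some s ↔
      dirs ≠ [] ∧ ∀ d ∈ dirs, ∃ hl : i < d.length, d[i] = s := by
  constructor
  · intro h
    obtain ⟨hall, -, hne⟩ := tokA_sound dirs i none s h
    exact ⟨hne rfl, hall⟩
  · rintro ⟨hne, h⟩
    rcases dirs with _ | ⟨d, rest⟩
    · exact absurd rfl hne
    · obtain ⟨hl, he⟩ := h d (by simp)
      simp only [tokA, dif_pos hl]
      rw [he]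
      exact tokA_complete rest i s (fun e he' => h e (by simp [he']))

theorem head?_drop' (l : List String) (i : Nat) : (l.drop i).head? = l[i]? := by
  simp [List.head?_drop]

theorem lcpAll_drop_none (dirs : List (List String)) (i : Nat)
    (h : tokA dirs i none = none) :
    lcpAll (dirs.map (List.drop i)) = [] := by
  rcases dirs with _ | ⟨d, rest⟩
  · simp only [List.map_nil]
    rw [lcpAll]
  · simp only [List.map_cons]
    rcases hd : d.drop i with _ | ⟨x, tl⟩
    · rw [lcpAll]
    · rw [lcpAll, if_neg]
      intro hall
      rw [List.all_eq_true] at hall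
      have htok : tokA (d :: rest) i none = some x := by
        rw [tokA_some]
        refine ⟨by simp, ?_⟩
        intro e he
        have hhd : (e.drop i).head? = some x := by
          rcases List.mem_cons.mp he with rfl | he'
          · rw [hd]; rfl
          · have := hall (e.drop i) (by
              simp only [List.mem_cons]
              exact Or.inr (List.mem_map_of_mem he'))
            simpa using this
        rw [head?_drop'] at hhd
        rw [List.getElem?_eq_some_iff] at hhd
        exact hhd
      rw [htok] at h; cases h

theorem lcpAll_drop_some (dirs : List (List String)) (i : Nat) (s : String)
    (h : tokA dirs i none = some s) :
    lcpAll (dirs.map (List.drop i)) = s :: lcpAll (dirs.map (List.drop (i + 1))) := by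
  rw [tokA_some] at h
  obtain ⟨hne, hall⟩ := h
  rcases dirs with _ | ⟨d, rest⟩
  · exact absurd rfl hne
  · obtain ⟨hl, he⟩ := hall d (by simp)
    have hd : d.drop i = s :: d.drop (i + 1) := by
      rw [List.drop_eq_getElem_cons hl, he]
    simp only [List.map_cons, hd]
    rw [lcpAll, if_pos]
    · congr 1
      rw [tailsAll_eq_map, List.map_map]
      have hmap : List.map (List.tail ∘ List.drop i) rest = List.map (List.drop (i + 1)) rest :=
        List.map_congr_left (fun e _ => by simp [List.tail_drop])
      rw [hmap]
    · rw [List.all_eq_true]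
      intro r hr
      have : r.head? = some s := by
        rcases List.mem_cons.mp hr with rfl | hr'
        · rfl
        · rw [List.mem_map] at hr'
          obtain ⟨e, he', rfl⟩ := hr'
          obtain ⟨hl', he''⟩ := hall e (by simp [he'])
          rw [head?_drop', List.getElem?_eq_some_iff]
          exact ⟨hl', he''⟩
      simp [this]

theorem loopA_eq_lcpAll (dirs : List (List String)) (i : Nat) (pref : List String) :
    loopA dirs i pref = pref ++ lcpAll (dirs.map (List.drop i)) := by
  fun_induction loopA dirs i pref with
  | case1 i pref h =>
    rw [lcpAll_drop_none dirs i h]; simp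
  | case2 i pref s h' ih =>
    rw [ih, lcpAll_drop_some dirs i s h']
    simp

-- ----- B side: the fold of pairwise prefixes also computes lcpAll -----
theorem foldl_lcp2_nil (rest : List (List String)) :
    List.foldl lcp2 [] rest = [] := by
  induction rest with
  | nil => rfl
  | cons r rs ih => simpa [lcp2] using ih

theorem head?_lcp2 (a b : List String) (z : String)
    (h : (lcp2 a b).head? = some z) :
    a.head? = some z ∧ b.head? = some z := by
  rcases a with _ | ⟨x, xs⟩ <;> rcases b with _ | ⟨y, ys⟩ <;> simp [lcp2] at h
  by_cases hxy : x = y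
  · rw [if_pos hxy] at h
    simp only [List.head?_cons, Option.some.injEq] at h
    simp [← h, hxy]
  · rw [if_neg hxy] at h
    cases h

theorem head?_foldl_lcp2 (rest : List (List String)) :
    ∀ (a : List String) (z : String),
      (List.foldl lcp2 a rest).head? = some z →
      a.head? = some z ∧ ∀ r ∈ rest, r.head? = some z := by
  induction rest with
  | nil => intro a z h; exact ⟨h, by simp⟩
  | cons b rs ih =>
    intro a z h
    simp only [List.foldl_cons] at h
    obtain ⟨h1, h2⟩ := ih _ _ h
    obtain ⟨ha, hb⟩ := head?_lcp2 a b z h1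
    refine ⟨ha, ?_⟩
    intro r hr
    rcases List.mem_cons.mp hr with rfl | hr'
    · exact hb
    · exact h2 r hr'

theorem foldl_lcp2_cons (rest : List (List String)) :
    ∀ (x : String) (t0 : List String), (∀ r ∈ rest, r.head? = some x) →
      List.foldl lcp2 (x :: t0) rest = x :: List.foldl lcp2 t0 (rest.map List.tail) := by
  induction rest with
  | nil => intro x t0 _; rfl
  | cons b rs ih =>
    intro x t0 h
    have hb : b.head? = some x := h b (by simp)
    rcases b with _ | ⟨y, ys⟩
    · cases hb
    · simp only [List.head?_cons, Option.some.injEq] at hb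
      subst hb
      simp only [List.foldl_cons, List.map_cons, lcp2, if_pos, List.tail_cons]
      exact ih _ _ (fun r hr => h r (by simp [hr]))

theorem foldl_eq_lcpAll (d0 : List String) :
    ∀ (rest : List (List String)), List.foldl lcp2 d0 rest = lcpAll (d0 :: rest) := by
  induction d0 with
  | nil =>
    intro rest
    rw [foldl_lcp2_nil]
    rw [lcpAll]
  | cons x t0 ih =>
    intro rest
    by_cases hall : ∀ r ∈ rest, r.head? = some x
    · rw [lcpAll, if_pos, foldl_lcp2_cons rest x t0 hall, ← tailsAll_eq_map, ih]
      rw [List.all_eq_true]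
      intro r hr
      rcases List.mem_cons.mp hr with rfl | hr'
      · simp
      · simp [hall r hr']
    · rw [lcpAll, if_neg]
      · rcases hres : List.foldl lcp2 (x :: t0) rest with _ | ⟨z, zs⟩
        · rfl
        · exfalso
          have hz : (List.foldl lcp2 (x :: t0) rest).head? = some z := by
            rw [hres]; rfl
          obtain ⟨h1, h2⟩ := head?_foldl_lcp2 rest _ _ hz
          simp only [List.head?_cons, Option.some.injEq] at h1
          subst h1
          exact hall h2
      · rw [List.all_eq_true]
        push Not at hall
        obtain ⟨r, hr, hne⟩ := hall
        intro hc
        have := hc r (by simp [hr])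
        simp only [beq_iff_eq] at this
        exact hne this

-- ===== VERDICT (by name: the statement is the Claim_ definition above) =====
theorem common_dir_prefix_py_spec : Claim_equal_common_dir_prefix_py := by
  intro paths _
  unfold Spec_common_dir_prefix_py common_dir_prefix_py common_dir_prefix_py_alt
  rcases paths with _ | ⟨p, ps⟩
  · simp
  · rw [if_neg (by simp)]
    simp only [List.map_cons]
    rw [loopA_eq_lcpAll]
    have hmap : (p.dropLast :: List.map (fun p => p.dropLast) ps).map (List.drop 0)
        = p.dropLast :: List.map (fun p => p.dropLast) ps := by
      simp
    rw [hmap, ← foldl_eq_lcpAll]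
    simp
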